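-- pv_equiv track=rewrite | github.com/mrzrx/AI-mahjong | mahjongSavestatetwo.py | savestateget
-- ===== SOURCE A (Python) =====
-- def countList(list):
--     _a=0
--     for i in list:
--         _a=_a+i
--     return _a
--
-- def list2array(list):
--     """麻将游戏规则中心
--     具体如下表
--     ============================================
--     0    1     2   3    4    5    6    7    8
--     ============================================
--     一万 二万 三万 四万 五万 六万 七万 八万 九万
--     ============================================
--     9    10   11   12   13   14   15   16   17
--     ============================================
--     一条 二条 三条 四条 五条 六条 七条 八条 九条
--     ============================================
--     18    19   20   21   22   23   24   25   26
--     ============================================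
--     一筒 二筒 三筒 四筒 五筒 六筒 七筒 八筒 九筒
--     ============================================
--     27    28   29   30   31   32   33   34   35
--     ============================================
--     东风 南风 西风 北风 红中 发财 白板 (花1 花2没有）
--     ============================================
--     [0,1-9]
--     0表示总数，1-9分别用各自的个数表示
--     [8,8,8,8,7,6,5,4,3,2,1,0,0,0]
--     转化为
--     [[14, 3, 1, 1, 1, 1, 1, 1, 1, 4], [0, 0, 0, 0, 0, 0, 0, 0, 0, 0], [0, 0, 0, 0, 0, 0, 0, 0, 0, 0], [0, 0, 0, 0, 0, 0, 0, 0, 0, 0]]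
--     """
--     _allPai=[]
--     _w=[]
--     _t=[]
--     _s=[]
--     _z=[]
--     for k in range(0,9):
--         _w.append(list.count(k))
--
--     for k in range(9,18):
--         _t.append(list.count(k))
--
--     for k in range(18,27):
--         _s.append(list.count(k))
--
--     for k in range(27,36):
--         _z.append(list.count(k))
--
--     _w.insert(0,countList(_w))
--     _t.insert(0,countList(_t))
--     _s.insert(0,countList(_s))
--     _z.insert(0,countList(_z))
--     _allPai.append(_w)
--     _allPai.append(_t)
--     _allPai.append(_s)
--     _allPai.append(_z)
--     return _allPai
--
-- def savestateget(player,playersave):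
--     players=list2array(player)
--     for i in range(0,4):
--         for j in range(1,10):
--             if 3*i+j-1>33:
--                 break
--             if players[i][j] ==1:
--                 playersave[3*i+j-1][2]=1
--             elif players[i][j] ==2:
--                 playersave[3*i+j-1][1]=1
--             elif players[i][j] ==3:
--                 playersave[3*i+j-1][1]=1
--                 playersave[3*i+j-1][2]=1
--             elif players[i][j] ==4:
--                 playersave[3*i+j-1][0]=1
--     return playersave
-- ===== SOURCE B (Python) =====
-- def savestateget(player, playersave):
--     def flush(p, r):
--         if 0 <= p < 36 and 1 <= r <= 4:
--             row = playersave[p - 6 * (p // 9)]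
--             if r == 1:
--                 row[2] = 1
--             elif r == 2:
--                 row[1] = 1
--             elif r == 3:
--                 row[1] = 1
--                 row[2] = 1
--             elif r == 4:
--                 row[0] = 1
--     prev = None
--     run = 0
--     for v in sorted(player):
--         if prev is not None and v == prev:
--             run += 1
--         else:
--             if prev is not None:
--                 flush(prev, run)
--             prev, run = v, 1
--     if prev is not None:
--         flush(prev, run)
--     return playersave
-- ===== Notes on version B (the rewrite author's own statement) =====
-- stated objective: alternative
-- what changed: Replaced A's count-table pipeline (countList + list2array builds four suit rows via 36 full list.count scans, then nested i/j index loops re-scan the table) by sort-then-run-length-scan: sort the hand once and walk it, grouping equal tiles into runs and flushing each run's flags directly when the run ends.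
import Mathlib
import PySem

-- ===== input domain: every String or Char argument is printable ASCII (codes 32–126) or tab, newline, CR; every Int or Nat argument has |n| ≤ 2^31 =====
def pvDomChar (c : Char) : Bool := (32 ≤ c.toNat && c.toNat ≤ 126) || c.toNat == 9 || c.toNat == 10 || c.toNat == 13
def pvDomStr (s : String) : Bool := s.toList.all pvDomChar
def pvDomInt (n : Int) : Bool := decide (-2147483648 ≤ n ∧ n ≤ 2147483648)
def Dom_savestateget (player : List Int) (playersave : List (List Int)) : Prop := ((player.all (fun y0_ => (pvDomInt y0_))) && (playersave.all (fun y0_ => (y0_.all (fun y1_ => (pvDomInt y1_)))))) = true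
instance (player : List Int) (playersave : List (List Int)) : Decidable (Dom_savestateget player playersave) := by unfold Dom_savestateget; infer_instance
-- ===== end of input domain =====

-- B replaces A's grouped count-table (countList + list2array, 36 full list.count scans, then
-- nested i/j index loops) by sort-then-run-length-scan: sort the hand once, walk it grouping
-- equal tiles into runs, and flush each run's flags when the run ends. Python's A mutates
-- playersave in place (so does B); the equivalence proved here is about the RETURN value only.


-- ===== PORT A =====
-- playersave[idx][col] = 1 ; both Pythons raise IndexError when idx/col is out of range — those
-- inputs are excluded by Pre_ (List.modify / List.set are no-ops there; exact inside Pre_);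
-- idx here is never negative in either program.
def setCell (ps : List (List Int)) (idx col : Nat) : List (List Int) :=
  ps.modify idx (fun row => row.set col 1)

def countList (l : List Int) : Int := l.foldl (fun a i => a + i) 0

def list2array (l : List Int) : List (List Int) :=
  let w := (PySem.List.pyRange 0 9 1).map (fun k => (PySem.List.count l k : Int))
  let t := (PySem.List.pyRange 9 18 1).map (fun k => (PySem.List.count l k : Int))
  let s := (PySem.List.pyRange 18 27 1).map (fun k => (PySem.List.count l k : Int))
  let z := (PySem.List.pyRange 27 36 1).map (fun k => (PySem.List.count l k : Int))
  [countList w :: w, countList t :: t, countList s :: s, countList z :: z]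

-- the inner 'for j in range(1,10)' with its break; 3*i+j-1 ≥ 0 always (j ≥ 1), so .toNat is exact
def aInner (players : List (List Int)) (i : Int) (ps : List (List Int)) : List Int → List (List Int)
  | [] => ps
  | j :: rest =>
    if 3*i+j-1 > 33 then ps
    else
      let c := PySem.List.pyGetD (PySem.List.pyGetD players i []) j 0
      let ps' :=
        if c = 1 then setCell ps (3*i+j-1).toNat 2
        else if c = 2 then setCell ps (3*i+j-1).toNat 1
        else if c = 3 then setCell (setCell ps (3*i+j-1).toNat 1) (3*i+j-1).toNat 2
        else if c = 4 then setCell ps (3*i+j-1).toNat 0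
        else ps
      aInner players i ps' rest

def savestateget (player : List Int) (playersave : List (List Int)) : List (List Int) :=
  let players := list2array player
  (PySem.List.pyRange 0 4 1).foldl
    (fun ps i => aInner players i ps (PySem.List.pyRange 1 10 1)) playersave

-- ===== PORT B =====
-- flush(p, r): the guarded branch ladder applied to playersave when a run of r copies of tile p ends
def flushRun (ps : List (List Int)) (prev : Option Int) (run : Int) : List (List Int) :=
  match prev with
  | none => ps
  | some p =>
    if 0 ≤ p ∧ p < 36 ∧ 1 ≤ run ∧ run ≤ 4 then
      let idx := (p - 6 * PySem.Int.floordiv p 9).toNat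
      if run = 1 then setCell ps idx 2
      else if run = 2 then setCell ps idx 1
      else if run = 3 then setCell (setCell ps idx 1) idx 2
      else if run = 4 then setCell ps idx 0
      else ps
    else ps

-- the 'for v in sorted(player)' loop with state (prev, run); the [] case is the final flush
def bLoop (ps : List (List Int)) (prev : Option Int) (run : Int) : List Int → List (List Int)
  | [] => flushRun ps prev run
  | v :: rest =>
    if some v = prev then bLoop ps prev (run + 1) rest
    else bLoop (flushRun ps prev run) (some v) 1 rest

def savestateget_alt (player : List Int) (playersave : List (List Int)) : List (List Int) :=
  bLoop playersave none 0 (PySem.List.sorted player (fun x => x) false)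

-- ===== PRECONDITION & SPEC =====
-- Pre_ is exactly where Python's A (and B) returns instead of raising IndexError: every flag write
-- that is attempted must be in range — for each distinct in-range tile value v with count c ∈ [1,4],
-- row idx = v-6*(v//9) must exist and be long enough for the highest column that count writes
-- (c=4 → col 0; c=2 → col 1; c=1,3 → col 2).
def Pre_savestateget (player : List Int) (playersave : List (List Int)) : Prop :=
  ∀ v ∈ player, 0 ≤ v → v < 36 →
    (1 ≤ player.count v ∧ player.count v ≤ 4) →
      ((v - 6 * PySem.Int.floordiv v 9).toNat < playersave.length ∧
       (if player.count v = 4 then 1 else if player.count v = 2 then 2 else 3)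
         ≤ (playersave.getD (v - 6 * PySem.Int.floordiv v 9).toNat []).length)
instance (player : List Int) (playersave : List (List Int)) : Decidable (Pre_savestateget player playersave) := by unfold Pre_savestateget; infer_instance

def pvWitness_savestateget : List Int × List (List Int) :=
  ([0, 0, 9, 35, 17, 17, 17, 17],
   [[0,0,0],[0,0,0],[0,0,0],[0,0,0],[0,0,0],[0,0,0],[0,0,0],[0,0,0],[0,0,0],
    [0,0,0],[0,0,0],[0,0,0],[0,0,0],[0,0,0],[0,0,0],[0,0,0],[0,0,0],[0,0,0]])

def Spec_savestateget (player : List Int) (playersave : List (List Int)) (out : List (List Int)) : Prop := out = savestateget_alt player playersave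
instance (player : List Int) (playersave : List (List Int)) (out : List (List Int)) : Decidable (Spec_savestateget player playersave out) := by unfold Spec_savestateget; infer_instance

-- ===== CLAIM (what is proved, stated in full; the proofs are below) =====
def Claim_equal_savestateget : Prop := ∀ (player : List Int) (playersave : List (List Int)), Dom_savestateget player playersave → Pre_savestateget player playersave → Spec_savestateget player playersave (savestateget player playersave)

-- ===== LEMMAS AND PROOFS =====

-- one flag write ("playersave[idx][col] = 1"), as data
def doWrite (ps : List (List Int)) (w : Nat × Nat) : List (List Int) := setCell ps w.1 w.2

-- the writes a tile value v with multiplicity player.count v induces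
def writes (player : List Int) (v : Int) : List (Nat × Nat) :=
  if 0 ≤ v ∧ v < 36 then
    let c : Int := (List.count v player : Int)
    let idx := (v - 6 * PySem.Int.floordiv v 9).toNat
    if c = 1 then [(idx, 2)]
    else if c = 2 then [(idx, 1)]
    else if c = 3 then [(idx, 1), (idx, 2)]
    else if c = 4 then [(idx, 0)]
    else []
  else []

-- the canonical per-tile-value step both programs are reduced to
def gstep (player : List Int) (ps : List (List Int)) (v : Int) : List (List Int) :=
  (writes player v).foldl doWrite ps

lemma setCell_comm (ps : List (List Int)) (i a j b : Nat) :
    setCell (setCell ps i a) j b = setCell (setCell ps j b) i a := by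
  unfold setCell
  apply List.ext_getElem?
  intro k
  simp only [List.getElem?_modify, Option.map_eq_map, Option.map_map]
  rcases ps[k]? with _ | row
  · rfl
  · simp only [Option.map_some]
    by_cases hik : i = k <;> by_cases hjk : j = k <;> simp [hik, hjk]
    by_cases hab : a = b
    · subst hab; rw [List.set_set]
    · rw [List.set_comm _ _ hab]

lemma doWrite_rcomm : ∀ (ps : List (List Int)) (x y : Nat × Nat),
    doWrite (doWrite ps x) y = doWrite (doWrite ps y) x := by
  intro ps x y; exact setCell_comm ps x.1 x.2 y.1 y.2

-- the guarded flush with the FULL multiplicity of v is exactly gstep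
lemma flush_gstep (player : List Int) (ps : List (List Int)) (v : Int) :
    flushRun ps (some v) ((List.count v player : Nat) : Int) = gstep player ps v := by
  simp only [flushRun, gstep, writes]
  by_cases h1 : 0 ≤ v ∧ v < 36
  · simp only [h1.1, h1.2, true_and]
    generalize List.count v player = n
    rcases n with _|_|_|_|_|m <;>
      · push_cast
        split_ifs <;> simp_all [List.foldl, doWrite] <;> omega
  · have h0 : ¬ (0 ≤ v ∧ v < 36 ∧ 1 ≤ ((List.count v player : Nat) : Int) ∧ ((List.count v player : Nat) : Int) ≤ 4) := by tauto
    rw [if_neg h0, if_neg h1]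
    rfl

-- dropping the leading run of v from a sorted tail removes ALL copies of v and no other element
lemma dropWhile_run (v : Int) : ∀ (rest : List Int), rest.Sorted (· ≤ ·) → (∀ x ∈ rest, v ≤ x) →
    v ∉ rest.dropWhile (fun x => x == v) ∧
    ∀ w, w ≠ v → List.count w (rest.dropWhile (fun x => x == v)) = List.count w rest := by
  intro rest
  induction rest with
  | nil => intro _ _; simp
  | cons x rest' ih =>
    intro hs hge
    by_cases hx : x = v
    · subst hx
      have hs' := hs.tail
      have hge' : ∀ y ∈ rest', x ≤ y := fun y hy => (List.sorted_cons.mp hs).1 y hy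
      have hd : (x :: rest').dropWhile (fun y => y == x) = rest'.dropWhile (fun y => y == x) := by
        simp [List.dropWhile]
      obtain ⟨h1, h2⟩ := ih hs' hge'
      refine ⟨by rw [hd]; exact h1, ?_⟩
      intro w hw
      rw [hd, h2 w hw, List.count_cons]
      simp [Ne.symm hw]
    · have hb : (x == v) = false := by simpa using hx
      have hd : (x :: rest').dropWhile (fun y => y == v) = x :: rest' := by
        simp [List.dropWhile, hb]
      rw [hd]
      refine ⟨?_, fun w _ => rfl⟩
      intro hmem
      rcases List.mem_cons.mp hmem with h | h
      · exact hx h.symm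
      · have hxv : x ≤ v := (List.sorted_cons.mp hs).1 v h
        have hvx : v ≤ x := hge x List.mem_cons_self
        exact hx (le_antisymm hxv hvx)

-- running bLoop with an open run of r copies of p: the run is completed (all remaining copies of
-- p are at the front, by sortedness), flushed with the total multiplicity, and the loop restarts
lemma bLoop_run (p : Int) : ∀ (rest : List Int), rest.Sorted (· ≤ ·) → (∀ x ∈ rest, p ≤ x) →
    ∀ (ps : List (List Int)) (r : Int),
    bLoop ps (some p) r rest
      = bLoop (flushRun ps (some p) (r + (List.count p rest : Nat))) none 0
          (rest.dropWhile (fun x => x == p)) := by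
  intro rest
  induction rest with
  | nil => intro _ _ ps r; simp [bLoop]; rfl
  | cons w rest' ih =>
    intro hs hge ps r
    by_cases hw : w = p
    · subst hw
      have hstep : bLoop ps (some w) r (w :: rest') = bLoop ps (some w) (r + 1) rest' := by
        simp [bLoop]
      rw [hstep, ih hs.tail (fun y hy => (List.sorted_cons.mp hs).1 y hy) ps (r + 1)]
      have hc : List.count w (w :: rest') = List.count w rest' + 1 := by
        simp [List.count_cons]
      have hd : (w :: rest').dropWhile (fun x => x == w) = rest'.dropWhile (fun x => x == w) := by
        simp [List.dropWhile]
      rw [hc, hd]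
      congr 2
      push_cast
      ring
    · have hstep : bLoop ps (some p) r (w :: rest') = bLoop (flushRun ps (some p) r) (some w) 1 rest' := by
        simp [bLoop, hw]
      have hpn : p ∉ w :: rest' := by
        intro hmem
        rcases List.mem_cons.mp hmem with h | h
        · exact hw h.symm
        · have h1 : w ≤ p := (List.sorted_cons.mp hs).1 p h
          have h2 : p ≤ w := hge w List.mem_cons_self
          exact hw (le_antisymm h1 h2)
      have hc : List.count p (w :: rest') = 0 := List.count_eq_zero.mpr hpn
      have hb : (w == p) = false := by simpa using hw
      have hd : (w :: rest').dropWhile (fun x => x == p) = w :: rest' := by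
        simp [List.dropWhile, hb]
      rw [hstep, hc, hd]
      have hrhs : bLoop (flushRun ps (some p) (r + ((0 : Nat) : Int))) none 0 (w :: rest')
          = bLoop (flushRun (flushRun ps (some p) (r + ((0 : Nat) : Int))) none 0) (some w) 1 rest' := by
        simp [bLoop]
      rw [hrhs]
      norm_num [flushRun]

lemma gstep_not_mem (player : List Int) (ps : List (List Int)) (v : Int) (h : v ∉ player) :
    gstep player ps v = ps := by
  simp [gstep, writes, List.count_eq_zero.mpr h]

lemma gstep_out (player : List Int) (ps : List (List Int)) (v : Int) (h : ¬ (0 ≤ v ∧ v < 36)) :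
    gstep player ps v = ps := by
  simp [gstep, writes, h]

lemma gstep_comm (player : List Int) (ps : List (List Int)) (v w : Int) :
    gstep player (gstep player ps v) w = gstep player (gstep player ps w) v := by
  unfold gstep
  rw [← List.foldl_append, ← List.foldl_append]
  exact List.Perm.foldl_eq (rcomm := ⟨doWrite_rcomm⟩) List.perm_append_comm ps

-- fold of gstep over two nodup lists with the same members is the same (writes commute)
lemma fold_gstep_of_mem_iff (player : List Int) (xs ys : List Int)
    (hx : xs.Nodup) (hy : ys.Nodup) (hmem : ∀ a, a ∈ xs ↔ a ∈ ys) (ps : List (List Int)) :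
    xs.foldl (gstep player) ps = ys.foldl (gstep player) ps := by
  refine List.Perm.foldl_eq (rcomm := ⟨fun b a₁ a₂ => gstep_comm player b a₁ a₂⟩) ?_ ps
  rw [List.perm_ext_iff_of_nodup hx hy]
  exact hmem

-- the run-length scan over a sorted list whose counts agree with player's = fold of gstep over
-- its distinct values
lemma bLoop_eq (player : List Int) : ∀ (n : Nat) (xs : List Int), xs.length ≤ n →
    xs.Sorted (· ≤ ·) → (∀ w ∈ xs, List.count w xs = List.count w player) →
    ∀ ps, bLoop ps none 0 xs = (PySem.Set.ofList xs).foldl (gstep player) ps := by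
  intro n
  induction n with
  | zero =>
    intro xs hlen _ _ ps
    have : xs = [] := List.eq_nil_of_length_eq_zero (Nat.le_zero.mp hlen)
    subst this
    simp [bLoop, flushRun, PySem.Set.ofList]
  | succ m ih =>
    intro xs hlen hs hcnt ps
    match xs with
    | [] => simp [bLoop, flushRun, PySem.Set.ofList]
    | v :: rest =>
      have hge : ∀ x ∈ rest, v ≤ x := fun y hy => (List.sorted_cons.mp hs).1 y hy
      have hstep : bLoop ps none 0 (v :: rest) = bLoop ps (some v) 1 rest := by
        simp [bLoop, flushRun]
      rw [hstep, bLoop_run v rest hs.tail hge ps 1]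
      set suffix := rest.dropWhile (fun x => x == v) with hsfx
      obtain ⟨hvn, hcs⟩ := dropWhile_run v rest hs.tail hge
      -- the flushed total is exactly the multiplicity of v
      have htot : (1 : Int) + (List.count v rest : Nat) = ((List.count v (v :: rest) : Nat) : Int) := by
        simp [List.count_cons]
        push_cast
        ring
      rw [htot, hcnt v List.mem_cons_self, flush_gstep player ps v]
      -- suffix is shorter, sorted, and count-faithful
      have hsub : suffix.Sublist rest := List.dropWhile_sublist _
      have hlen' : suffix.length ≤ m := by
        have := hsub.length_le
        simp only [List.length_cons] at hlen
        omega
      have hsort' : suffix.Sorted (· ≤ ·) := hs.tail.sublist hsub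
      have hcnt' : ∀ w ∈ suffix, List.count w suffix = List.count w player := by
        intro w hw
        have hwv : w ≠ v := by rintro rfl; exact hvn hw
        have hwrest : w ∈ rest := hsub.mem hw
        rw [hcs w hwv]
        have := hcnt w (List.mem_cons_of_mem _ hwrest)
        rwa [List.count_cons, if_neg (by simpa using hwv.symm), Nat.add_zero] at this
      rw [ih suffix hlen' hsort' hcnt' (gstep player ps v)]
      -- fold over ofList suffix after gstep v = fold over ofList (v :: rest)
      have hfold : (v :: PySem.Set.ofList suffix).foldl (gstep player) ps
          = (PySem.Set.ofList suffix).foldl (gstep player) (gstep player ps v) := rfl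
      rw [← hfold]
      refine fold_gstep_of_mem_iff player _ _ ?_ ?_ ?_ ps
      · refine List.nodup_cons.mpr ⟨?_, PySem.Set.nodup_ofList _⟩
        rw [PySem.Set.mem_ofList]
        exact hvn
      · exact PySem.Set.nodup_ofList _
      · intro a
        rw [List.mem_cons, PySem.Set.mem_ofList, PySem.Set.mem_ofList, List.mem_cons]
        constructor
        · rintro (h | h)
          · exact Or.inl h
          · exact Or.inr (hsub.mem h)
        · rintro (h | h)
          · exact Or.inl h
          · by_cases hav : a = v
            · exact Or.inl hav
            · refine Or.inr ?_
              have hpos : 0 < List.count a suffix := by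
                rw [hcs a hav]
                exact List.count_pos_iff.mpr h
              exact List.count_pos_iff.mp hpos

-- ladder rewriting for A's branch chain
lemma ladder (c : Int) (idx : Nat) (ps : List (List Int)) :
  (if c = 1 then setCell ps idx 2
   else if c = 2 then setCell ps idx 1
   else if c = 3 then setCell (setCell ps idx 1) idx 2
   else if c = 4 then setCell ps idx 0 else ps)
  = List.foldl doWrite ps (if c = 1 then [(idx,2)] else if c = 2 then [(idx,1)]
      else if c = 3 then [(idx,1),(idx,2)] else if c = 4 then [(idx,0)] else []) := by
  split_ifs <;> simp [List.foldl, doWrite]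

lemma gstep_eval (player : List Int) (ps : List (List Int)) (v : Int)
    (hv0 : 0 ≤ v) (hv36 : v < 36) :
    gstep player ps v =
      (if ((List.count v player : Nat) : Int) = 1 then setCell ps (v - 6 * PySem.Int.floordiv v 9).toNat 2
       else if ((List.count v player : Nat) : Int) = 2 then setCell ps (v - 6 * PySem.Int.floordiv v 9).toNat 1
       else if ((List.count v player : Nat) : Int) = 3 then setCell (setCell ps (v - 6 * PySem.Int.floordiv v 9).toNat 1) (v - 6 * PySem.Int.floordiv v 9).toNat 2
       else if ((List.count v player : Nat) : Int) = 4 then setCell ps (v - 6 * PySem.Int.floordiv v 9).toNat 0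
       else ps) := by
  rw [ladder]
  simp only [gstep, writes, if_pos (And.intro hv0 hv36)]

lemma row_lookup (player : List Int) (i j : Int) (hi0 : 0 ≤ i) (hi4 : i < 4)
    (hj1 : 1 ≤ j) (hj10 : j < 10) :
    PySem.List.pyGetD (PySem.List.pyGetD (list2array player) i []) j 0
      = ((List.count (9*i+j-1) player : Nat) : Int) := by
  interval_cases i <;> interval_cases j <;>
    norm_num [list2array, PySem.List.pyGetD, PySem.List.pyGet?, PySem.List.pyIdx?,
      show PySem.List.pyRange 0 9 1 = [0,1,2,3,4,5,6,7,8] from rfl,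
      show PySem.List.pyRange 9 18 1 = [9,10,11,12,13,14,15,16,17] from rfl,
      show PySem.List.pyRange 18 27 1 = [18,19,20,21,22,23,24,25,26] from rfl,
      show PySem.List.pyRange 27 36 1 = [27,28,29,30,31,32,33,34,35] from rfl,
      PySem.List.count_eq] <;> rfl

lemma idx_eq (i j : Int) (_hi0 : 0 ≤ i) (_hi4 : i < 4) (hj1 : 1 ≤ j) (hj10 : j < 10) :
    ((9*i+j-1) - 6 * PySem.Int.floordiv (9*i+j-1) 9).toNat = (3*i+j-1).toNat := by
  have h9 : PySem.Int.floordiv (9*i+j-1) 9 = i := by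
    rw [PySem.Int.floordiv_eq_iff_of_pos (by norm_num)]
    omega
  rw [h9]; omega

lemma aInner_eq (player : List Int) (i : Int) (hi0 : 0 ≤ i) (hi4 : i < 4)
    (js : List Int) (hjs : ∀ j ∈ js, 1 ≤ j ∧ j < 10) (ps : List (List Int)) :
    aInner (list2array player) i ps js
      = (js.map (fun j => 9*i+j-1)).foldl (gstep player) ps := by
  induction js generalizing ps with
  | nil => simp [aInner]
  | cons j rest ih =>
    obtain ⟨hj1, hj10⟩ := hjs j (List.mem_cons_self)
    simp only [aInner, List.map, List.foldl]
    rw [if_neg (by omega : ¬ (3*i+j-1 > 33)), row_lookup player i j hi0 hi4 hj1 hj10,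
        gstep_eval player ps (9*i+j-1) (by omega) (by omega),
        idx_eq i j hi0 hi4 hj1 hj10]
    exact ih (fun x hx => hjs x (List.mem_cons_of_mem _ hx)) _

lemma A_eq (player : List Int) (ps : List (List Int)) :
    savestateget player ps =
      ([0, 1, 2, 3, 4, 5, 6, 7, 8, 9, 10, 11, 12, 13, 14, 15, 16, 17, 18, 19, 20, 21, 22, 23,
        24, 25, 26, 27, 28, 29, 30, 31, 32, 33, 34, 35] : List Int).foldl (gstep player) ps := by
  simp only [savestateget,
    show PySem.List.pyRange 0 4 1 = [0,1,2,3] from rfl, List.foldl]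
  rw [aInner_eq player 0 (by norm_num) (by norm_num) _ (by decide) ps,
      aInner_eq player 1 (by norm_num) (by norm_num) _ (by decide),
      aInner_eq player 2 (by norm_num) (by norm_num) _ (by decide),
      aInner_eq player 3 (by norm_num) (by norm_num) _ (by decide)]
  rw [show (List.map (fun j => 9*0+j-1) (PySem.List.pyRange 1 10 1)) = [0,1,2,3,4,5,6,7,8] from by decide,
      show (List.map (fun j => 9*1+j-1) (PySem.List.pyRange 1 10 1)) = [9,10,11,12,13,14,15,16,17] from by decide,
      show (List.map (fun j => 9*2+j-1) (PySem.List.pyRange 1 10 1)) = [18,19,20,21,22,23,24,25,26] from by decide,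
      show (List.map (fun j => 9*3+j-1) (PySem.List.pyRange 1 10 1)) = [27,28,29,30,31,32,33,34,35] from by decide]
  simp [List.foldl]

lemma mem_L36 (a : Int) :
    a ∈ ([0, 1, 2, 3, 4, 5, 6, 7, 8, 9, 10, 11, 12, 13, 14, 15, 16, 17, 18, 19, 20, 21, 22, 23,
        24, 25, 26, 27, 28, 29, 30, 31, 32, 33, 34, 35] : List Int) ↔ 0 ≤ a ∧ a < 36 := by
  simp; omega

lemma fold_perm (player : List Int) (ps : List (List Int)) :
    ([0, 1, 2, 3, 4, 5, 6, 7, 8, 9, 10, 11, 12, 13, 14, 15, 16, 17, 18, 19, 20, 21, 22, 23,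
        24, 25, 26, 27, 28, 29, 30, 31, 32, 33, 34, 35] : List Int).foldl (gstep player) ps
      = (PySem.Set.ofList player).foldl (gstep player) ps := by
  have h1 : ([0, 1, 2, 3, 4, 5, 6, 7, 8, 9, 10, 11, 12, 13, 14, 15, 16, 17, 18, 19, 20, 21, 22, 23,
        24, 25, 26, 27, 28, 29, 30, 31, 32, 33, 34, 35] : List Int).foldl (gstep player) ps
      = (([0, 1, 2, 3, 4, 5, 6, 7, 8, 9, 10, 11, 12, 13, 14, 15, 16, 17, 18, 19, 20, 21, 22, 23,
        24, 25, 26, 27, 28, 29, 30, 31, 32, 33, 34, 35] : List Int).filter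
          (fun v => decide (v ∈ player))).foldl (gstep player) ps := by
    rw [List.foldl_filter]
    apply PySem.List.foldl_congr_mem
    intro acc x _
    by_cases hm : x ∈ player
    · simp [hm]
    · simp [hm, gstep_not_mem player acc x hm]
  have h2 : (PySem.Set.ofList player).foldl (gstep player) ps
      = ((PySem.Set.ofList player).filter (fun v => decide (0 ≤ v ∧ v < 36))).foldl (gstep player) ps := by
    rw [List.foldl_filter]
    apply PySem.List.foldl_congr_mem
    intro acc x _
    by_cases hr : 0 ≤ x ∧ x < 36
    · simp [hr]
    · simp [hr, gstep_out player acc x hr]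
  rw [h1, h2]
  refine fold_gstep_of_mem_iff player _ _ (List.Nodup.filter _ (by decide))
    (List.Nodup.filter _ (PySem.Set.nodup_ofList player)) ?_ ps
  intro a
  simp only [List.mem_filter, PySem.Set.mem_ofList, mem_L36, decide_eq_true_eq]
  tauto

lemma B_eq (player : List Int) (ps : List (List Int)) :
    savestateget_alt player ps = (PySem.Set.ofList player).foldl (gstep player) ps := by
  simp only [savestateget_alt]
  have hperm := PySem.List.sorted_perm player (fun x => x) false
  have hsort : (PySem.List.sorted player (fun x => x) false).Sorted (· ≤ ·) := by
    have := PySem.List.sorted_pairwise player (fun x => x)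
    simpa [List.Sorted] using this
  have hcnt : ∀ w ∈ PySem.List.sorted player (fun x => x) false,
      List.count w (PySem.List.sorted player (fun x => x) false) = List.count w player :=
    fun w _ => hperm.count_eq w
  rw [bLoop_eq player (PySem.List.sorted player (fun x => x) false).length _ le_rfl hsort hcnt ps]
  refine fold_gstep_of_mem_iff player _ _ (PySem.Set.nodup_ofList _) (PySem.Set.nodup_ofList _) ?_ ps
  intro a
  rw [PySem.Set.mem_ofList, PySem.Set.mem_ofList]
  exact hperm.mem_iff

-- ===== VERDICT (by name: the statement is the Claim_ definition above) =====
theorem savestateget_spec : Claim_equal_savestateget := by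
  intro player playersave _ _
  unfold Spec_savestateget
  rw [A_eq, B_eq, fold_perm]
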